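-- pv_equiv track=rewrite | github.com/chjkh8113/MDP | scripts/question_segmenter.py | refine_boundaries_with_gaps
-- ===== SOURCE A (Python) =====
-- from typing import List, Tuple, Optional, Dict
--
-- def refine_boundaries_with_gaps(
--
--     initial_boundaries: List[Tuple[int, int]],
--     gaps: List[Tuple[int, int]],
--     tolerance: int = 50
-- ) -> List[Tuple[int, int]]:
--     """Refine boundaries using detected gaps."""
--     if not gaps:
--         return initial_boundaries
--
--     refined = []
--     for start, end in initial_boundaries:
--         # Find nearest gap to the boundary
--         best_start = start
--         best_end = end
--
--         for gap_start, gap_end in gaps: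
--             gap_center = (gap_start + gap_end) // 2
--
--             # Adjust start if gap is near
--             if abs(gap_center - start) < tolerance:
--                 best_start = gap_end
--
--             # Adjust end if gap is near
--             if abs(gap_center - end) < tolerance:
--                 best_end = gap_start
--
--         refined.append((best_start, best_end))
--
--     return refined
-- ===== SOURCE B (Python) =====
-- def refine_boundaries_with_gaps(
--     initial_boundaries,
--     gaps,
--     tolerance=50
-- ):
--     """Refine boundaries using detected gaps.
--
--     Different algorithm: decorate each gap with (center, original_index),
--     sort once by center, then for each boundary endpoint binary-search the
--     window of centers within tolerance and take the max-original-index gap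
--     in that window (= A's last-wins rule).  bisect is hand-written because
--     the original module imports nothing beyond typing.
--     """
--     items = sorted([((gs + ge) // 2, i, gs, ge) for i, (gs, ge) in enumerate(gaps)],
--                    key=lambda t: t[0])
--     centers = [t[0] for t in items]
--
--     def bisect_left(a, x):
--         lo, hi = 0, len(a)
--         while lo < hi:
--             mid = (lo + hi) // 2
--             if a[mid] < x:
--                 lo = mid + 1
--             else:
--                 hi = mid
--         return lo
--
--     def query(x):
--         lo = bisect_left(centers, x - tolerance + 1)
--         hi = bisect_left(centers, x + tolerance)
--         best = None
--         for t in items[lo:hi]: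
--             if best is None or t[1] > best[1]:
--                 best = t
--         return best
--
--     out = []
--     for s, e in initial_boundaries:
--         bs = query(s)
--         be = query(e)
--         out.append((bs[3] if bs is not None else s,
--                     be[2] if be is not None else e))
--     return out
-- ===== Notes on version B (the rewrite author's own statement) =====
-- stated objective: faster
-- what changed: B replaces A's per-boundary scan over all gaps by decorating gaps with (center, original index), sorting by center once, binary-searching each endpoint's tolerance window and taking the max-original-index gap in the window (A's last-wins rule).
import Mathlib
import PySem

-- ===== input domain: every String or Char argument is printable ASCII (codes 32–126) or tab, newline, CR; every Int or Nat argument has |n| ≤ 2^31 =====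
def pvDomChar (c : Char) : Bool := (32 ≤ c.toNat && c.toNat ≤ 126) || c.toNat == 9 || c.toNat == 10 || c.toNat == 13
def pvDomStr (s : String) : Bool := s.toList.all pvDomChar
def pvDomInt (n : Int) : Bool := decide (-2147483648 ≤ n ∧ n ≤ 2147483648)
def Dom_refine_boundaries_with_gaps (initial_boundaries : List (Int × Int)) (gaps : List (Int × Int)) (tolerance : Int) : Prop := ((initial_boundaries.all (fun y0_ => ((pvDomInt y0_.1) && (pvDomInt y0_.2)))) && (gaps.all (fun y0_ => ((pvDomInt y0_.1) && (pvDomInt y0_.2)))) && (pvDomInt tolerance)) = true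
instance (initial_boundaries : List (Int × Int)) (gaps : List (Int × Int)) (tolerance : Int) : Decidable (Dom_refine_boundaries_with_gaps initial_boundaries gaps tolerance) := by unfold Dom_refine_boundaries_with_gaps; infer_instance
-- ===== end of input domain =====

-- B: one honest line — gaps are decorated with (center, original index), sorted by center once;
-- each endpoint binary-searches its tolerance window and takes the max-index gap there
-- (= A's last-wins nested scan); objective: alternative algorithm (sort + binary search).

-- ===== PORT A =====
def refine_boundaries_with_gaps (initial_boundaries : List (Int × Int)) (gaps : List (Int × Int)) (tolerance : Int) : List (Int × Int) :=
  if gaps = [] then initial_boundaries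
  else
    initial_boundaries.foldl
      (fun refined se =>
        let best := gaps.foldl
          (fun (b : Int × Int) g =>
            let gap_center := PySem.Int.floordiv (g.1 + g.2) 2
            let bs := if |gap_center - se.1| < tolerance then g.2 else b.1
            let be := if |gap_center - se.2| < tolerance then g.1 else b.2
            (bs, be))
          (se.1, se.2)
        refined ++ [best])
      []

-- ===== PORT B =====
-- decorated gaps [(center, original index, gap_start, gap_end)], then sorted by center (stable)
def pvDecor (gaps : List (Int × Int)) : List (Int × Int × Int × Int) :=
  gaps.zipIdx.map (fun gi => (PySem.Int.floordiv (gi.1.1 + gi.1.2) 2, (gi.2 : Int), gi.1.1, gi.1.2))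

def pvItems (gaps : List (Int × Int)) : List (Int × Int × Int × Int) :=
  PySem.List.sorted (pvDecor gaps) (fun t => t.1) false

-- hand-written bisect_left from Source B (the module may not import bisect), fuel = hi - lo
def pvBisectLoop (a : List Int) (x : Int) : Nat → Nat → Nat → Nat
  | 0, lo, _ => lo
  | fuel+1, lo, hi =>
    if lo < hi then
      match a[(lo + hi) / 2]? with
      | some y => if y < x then pvBisectLoop a x fuel ((lo + hi) / 2 + 1) hi
                  else pvBisectLoop a x fuel lo ((lo + hi) / 2)
      | none => lo
    else lo

def pvBisectLeft (a : List Int) (x : Int) : Nat :=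
  pvBisectLoop a x a.length 0 a.length

-- Source B's query: binary-search the window of centers within tolerance, keep the max-index item
def pvQuery (items : List (Int × Int × Int × Int)) (centers : List Int) (tolerance x : Int) :
    Option (Int × Int × Int × Int) :=
  let lo := pvBisectLeft centers (x - tolerance + 1)
  let hi := pvBisectLeft centers (x + tolerance)
  (PySem.List.slice items (some (lo : Int)) (some (hi : Int))).foldl
    (fun best t =>
      match best with
      | none => some t
      | some b => if t.2.1 > b.2.1 then some t else some b) none

def refine_boundaries_with_gaps_alt (initial_boundaries : List (Int × Int)) (gaps : List (Int × Int)) (tolerance : Int) : List (Int × Int) :=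
  let items := pvItems gaps
  let centers := items.map (fun t => t.1)
  initial_boundaries.foldl
    (fun out se =>
      let bs := pvQuery items centers tolerance se.1
      let be := pvQuery items centers tolerance se.2
      out ++ [((match bs with | some t => t.2.2.2 | none => se.1),
               (match be with | some t => t.2.2.1 | none => se.2))]) []

-- ===== PRECONDITION & SPEC =====
def Spec_refine_boundaries_with_gaps (initial_boundaries : List (Int × Int)) (gaps : List (Int × Int)) (tolerance : Int) (out : List (Int × Int)) : Prop := out = refine_boundaries_with_gaps_alt initial_boundaries gaps tolerance
instance (initial_boundaries : List (Int × Int)) (gaps : List (Int × Int)) (tolerance : Int) (out : List (Int × Int)) : Decidable (Spec_refine_boundaries_with_gaps initial_boundaries gaps tolerance out) := by unfold Spec_refine_boundaries_with_gaps; infer_instance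

-- ===== CLAIM =====
def Claim_equal_refine_boundaries_with_gaps : Prop := ∀ (initial_boundaries : List (Int × Int)) (gaps : List (Int × Int)) (tolerance : Int), Dom_refine_boundaries_with_gaps initial_boundaries gaps tolerance → Spec_refine_boundaries_with_gaps initial_boundaries gaps tolerance (refine_boundaries_with_gaps initial_boundaries gaps tolerance)

-- ===== LEMMAS AND PROOFS =====

-- the hand-written bisect loop is definitionally PySem's bisectLeft loop
theorem pv_bisect_eq (a : List Int) (x : Int) :
    pvBisectLeft a x = PySem.List.bisectLeft a x := by
  have h : ∀ fuel lo hi, pvBisectLoop a x fuel lo hi = PySem.List.bisectLeftLoop a x fuel lo hi := by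
    intro fuel
    induction fuel with
    | zero => intro lo hi; rfl
    | succ n ih =>
      intro lo hi
      simp only [pvBisectLoop, PySem.List.bisectLeftLoop]
      split_ifs with h1
      · cases a[(lo + hi) / 2]? with
        | none => rfl
        | some y => by_cases h2 : y < x <;> simp [h2, ih]
      · rfl
  unfold pvBisectLeft PySem.List.bisectLeft
  exact h _ _ _

-- last-wins fold = find? on the reversed list
theorem pv_foldl_last {α β : Type} (q : α → Prop) [DecidablePred q] (f : α → β) :
    ∀ (l : List α) (b : β),
      l.foldl (fun acc a => if q a then f a else acc) b
        = match l.reverse.find? (fun a => decide (q a)) with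
          | some a => f a
          | none => b := by
  intro l
  induction l with
  | nil => intro b; simp
  | cons g t ih =>
    intro b
    simp only [List.foldl_cons, List.reverse_cons, List.find?_append]
    rw [ih]
    cases h : t.reverse.find? (fun a => decide (q a)) with
    | some a => simp
    | none =>
      simp only [Option.none_or]
      by_cases hp : q g <;> simp [hp, List.find?]

-- A's inner pair fold splits into two independent last-wins folds
theorem pv_pair_fold (gaps : List (Int × Int)) (tolerance s e : Int) :
    ∀ (b : Int × Int),
      gaps.foldl
        (fun (b : Int × Int) g =>
          let gap_center := PySem.Int.floordiv (g.1 + g.2) 2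
          let bs := if |gap_center - s| < tolerance then g.2 else b.1
          let be := if |gap_center - e| < tolerance then g.1 else b.2
          (bs, be)) b
      = (gaps.foldl (fun acc g =>
            if |PySem.Int.floordiv (g.1 + g.2) 2 - s| < tolerance then g.2 else acc) b.1,
         gaps.foldl (fun acc g =>
            if |PySem.Int.floordiv (g.1 + g.2) 2 - e| < tolerance then g.1 else acc) b.2) := by
  induction gaps with
  | nil => intro b; rfl
  | cons g t ih => intro b; simp only [List.foldl_cons]; rw [ih]

-- window predicate: |center − x| < tolerance, read off the decorated tuple
def pvP (tolerance x : Int) (t : Int × Int × Int × Int) : Bool := decide (|t.1 - x| < tolerance)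

-- a list whose predicate holds exactly on positions [lo, hi) filters to its slice
theorem pv_filter_eq_window {α : Type} (p : α → Bool) :
    ∀ (l : List α) (lo hi : Nat),
      (∀ (j : Nat) (hj : j < l.length), j < lo → p l[j] = false) →
      (∀ (j : Nat) (hj : j < l.length), lo ≤ j → j < hi → p l[j] = true) →
      (∀ (j : Nat) (hj : j < l.length), hi ≤ j → p l[j] = false) →
      l.filter p = (l.drop lo).take (hi - lo) := by
  intro l
  induction l with
  | nil => intro lo hi _ _ _; simp
  | cons a t ih =>
    intro lo hi h1 h2 h3
    cases lo with
    | zero =>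
      cases hi with
      | zero =>
        have : ∀ x ∈ a :: t, p x = false := by
          intro x hx
          obtain ⟨j, hj, rfl⟩ := List.mem_iff_getElem.mp hx
          exact h3 j hj (Nat.zero_le j)
        rw [List.filter_eq_nil_iff.mpr (fun x hx => by simp [this x hx])]
        simp
      | succ m =>
        have hpa : p a = true := h2 0 (by simp) (Nat.zero_le 0) (Nat.succ_pos m)
        have ht := ih 0 m
          (fun j hj hlt => absurd hlt (Nat.not_lt_zero j))
          (fun j hj _ hjm => h2 (j+1) (by simpa using Nat.succ_lt_succ hj) (Nat.zero_le _) (Nat.succ_lt_succ hjm))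
          (fun j hj hmj => h3 (j+1) (by simpa using Nat.succ_lt_succ hj) (Nat.succ_le_succ hmj))
        simp [hpa, ht]
    | succ k =>
      have hpa : p a = false := h1 0 (by simp) (Nat.succ_pos k)
      have ht := ih k (hi - 1)
        (fun j hj hlt => h1 (j+1) (by simpa using Nat.succ_lt_succ hj) (Nat.succ_lt_succ hlt))
        (fun j hj hk hjh => h2 (j+1) (by simpa using Nat.succ_lt_succ hj) (Nat.succ_le_succ hk)
          (by omega))
        (fun j hj hh => h3 (j+1) (by simpa using Nat.succ_lt_succ hj) (by omega))
      have harith : hi - (k+1) = hi - 1 - k := by omega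
      simp [hpa, ht, harith]

-- Source B's max-index fold: its result is a member attaining the maximum index
theorem pv_maxfold_spec :
    ∀ (l : List (Int × Int × Int × Int)) (b t : Int × Int × Int × Int),
      l.foldl (fun best u =>
        match best with
        | none => some u
        | some b => if u.2.1 > b.2.1 then some u else some b) (some b) = some t →
      (t = b ∨ t ∈ l) ∧ b.2.1 ≤ t.2.1 ∧ ∀ u ∈ l, u.2.1 ≤ t.2.1 := by
  intro l
  induction l with
  | nil => intro b t h; simp at h; subst h; exact ⟨Or.inl rfl, le_refl _, by simp⟩
  | cons a l ih =>
    intro b t h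
    simp only [List.foldl_cons] at h
    by_cases hc : b.2.1 < a.2.1
    · rw [if_pos hc] at h
      obtain ⟨hm, hba, hall⟩ := ih a t h
      refine ⟨by rcases hm with h' | h'; exact Or.inr (by simp [h']); exact Or.inr (List.mem_cons_of_mem _ h'),
        le_trans (le_of_lt hc) hba, ?_⟩
      intro u hu
      rcases List.mem_cons.mp hu with h' | h'
      · subst h'; exact hba
      · exact hall u h'
    · rw [if_neg hc] at h
      obtain ⟨hm, hba, hall⟩ := ih b t h
      refine ⟨by rcases hm with h' | h'; exact Or.inl h'; exact Or.inr (List.mem_cons_of_mem _ h'), hba, ?_⟩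
      intro u hu
      rcases List.mem_cons.mp hu with h' | h'
      · subst h'; omega
      · exact hall u h'

theorem pv_maxfold_none :
    ∀ (l : List (Int × Int × Int × Int)) (b : Int × Int × Int × Int),
      l.foldl (fun best u =>
        match best with
        | none => some u
        | some b => if u.2.1 > b.2.1 then some u else some b) (some b) ≠ none := by
  intro l
  induction l with
  | nil => intro b; simp
  | cons a l ih => intro b; simp only [List.foldl_cons]; split <;> apply ih

-- in a list strictly increasing on index, equal indices force equal elements
theorem pv_idx_inj :
    ∀ (L : List (Int × Int × Int × Int)),
      L.Pairwise (fun a b => a.2.1 < b.2.1) →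
      ∀ t ∈ L, ∀ g ∈ L, t.2.1 = g.2.1 → t = g := by
  intro L
  induction L with
  | nil => intro _ t ht; simp at ht
  | cons a L ih =>
    intro hp t ht g hg heq
    have hpa := List.pairwise_cons.mp hp
    rcases List.mem_cons.mp ht with rfl | ht' <;> rcases List.mem_cons.mp hg with rfl | hg'
    · rfl
    · exact absurd heq (by have := hpa.1 g hg'; omega)
    · exact absurd heq (by have := hpa.1 t ht'; omega)
    · exact ih hpa.2 t ht' g hg' heq

-- the last element of an index-increasing list attains the maximum index
theorem pv_getLast_max :
    ∀ (L : List (Int × Int × Int × Int)) (g : Int × Int × Int × Int),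
      L.Pairwise (fun a b => a.2.1 < b.2.1) →
      L.getLast? = some g → g ∈ L ∧ ∀ u ∈ L, u.2.1 ≤ g.2.1 := by
  intro L
  induction L with
  | nil => intro g _ h; simp at h
  | cons a L ih =>
    intro g hp hl
    have hpa := List.pairwise_cons.mp hp
    cases hL : L with
    | nil =>
      subst hL
      simp at hl
      subst hl
      exact ⟨by simp, by simp⟩
    | cons b L' =>
      subst hL
      rw [List.getLast?_cons_cons] at hl
      obtain ⟨hm, hmax⟩ := ih g hpa.2 hl
      refine ⟨List.mem_cons_of_mem _ hm, ?_⟩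
      intro u hu
      rcases List.mem_cons.mp hu with rfl | hu'
      · exact le_of_lt (hpa.1 g hm)
      · exact hmax u hu'

-- the decorated list is strictly increasing on original index
theorem pv_decor_pairwise (gaps : List (Int × Int)) :
    (pvDecor gaps).Pairwise (fun a b => a.2.1 < b.2.1) := by
  unfold pvDecor
  rw [List.pairwise_map]
  rw [List.pairwise_iff_getElem]
  intro i j hi hj hij
  simp only [List.getElem_zipIdx]
  exact_mod_cast by omega

-- Source B's query equals the last tolerance-matching decorated gap in original order
theorem pv_query_eq (gaps : List (Int × Int)) (tolerance x : Int) :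
    pvQuery (pvItems gaps) ((pvItems gaps).map (fun t => t.1)) tolerance x
      = (pvDecor gaps).reverse.find? (pvP tolerance x) := by
  have hperm : (pvItems gaps).Perm (pvDecor gaps) := PySem.List.sorted_perm _ _ _
  have hsort : ((pvItems gaps).map (fun t => t.1)).Pairwise (· ≤ ·) :=
    PySem.List.sorted_map_key_pairwise (pvDecor gaps) (fun t => t.1)
  -- bisect bounds on the sorted centers
  have hspec1 := PySem.List.bisectLeft_spec ((pvItems gaps).map (fun t => t.1)) (x - tolerance + 1) hsort
  have hspec2 := PySem.List.bisectLeft_spec ((pvItems gaps).map (fun t => t.1)) (x + tolerance) hsort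
  set lo := PySem.List.bisectLeft ((pvItems gaps).map (fun t => t.1)) (x - tolerance + 1) with hlo
  set hi := PySem.List.bisectLeft ((pvItems gaps).map (fun t => t.1)) (x + tolerance) with hhi
  have hlen : ((pvItems gaps).map (fun t => t.1)).length = (pvItems gaps).length := List.length_map ..
  -- the slice is exactly the filter of the window predicate
  have hwin : (pvItems gaps).filter (pvP tolerance x) = ((pvItems gaps).drop lo).take (hi - lo) := by
    apply pv_filter_eq_window
    · intro j hj hjlo
      have := hspec1.2.1 j (by rw [hlen]; exact hj) hjlo
      simp only [List.getElem_map] at this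
      simp only [pvP, decide_eq_false_iff_not, abs_lt]
      omega
    · intro j hj hloj hjhi
      have h1 := hspec1.2.2 j (by rw [hlen]; exact hj) hloj
      have h2 := hspec2.2.1 j (by rw [hlen]; exact hj) hjhi
      simp only [List.getElem_map] at h1 h2
      simp only [pvP, decide_eq_true_eq, abs_lt]
      omega
    · intro j hj hhij
      have := hspec2.2.2 j (by rw [hlen]; exact hj) hhij
      simp only [List.getElem_map] at this
      simp only [pvP, decide_eq_false_iff_not, abs_lt]
      omega
  -- both sides as statements about the filtered lists
  simp only [pvQuery, pv_bisect_eq]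
  rw [← hlo, ← hhi]
  rw [PySem.List.slice_natCast, ← hwin]
  -- RHS: find? on reverse = getLast? of filter
  rw [← List.head?_filter, List.filter_reverse, ← List.getLast?_eq_head?_reverse]
  -- both are options over permuted index-distinct lists; compare them
  have hLp : ((pvDecor gaps).filter (pvP tolerance x)).Pairwise (fun a b => a.2.1 < b.2.1) :=
    (pv_decor_pairwise gaps).filter _
  have hfp : ((pvItems gaps).filter (pvP tolerance x)).Perm ((pvDecor gaps).filter (pvP tolerance x)) :=
    hperm.filter _
  cases hl : ((pvDecor gaps).filter (pvP tolerance x)).getLast? with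
  | none =>
    have hnil : (pvDecor gaps).filter (pvP tolerance x) = [] := by
      cases h : (pvDecor gaps).filter (pvP tolerance x) with
      | nil => rfl
      | cons a t => rw [h] at hl; simp [List.getLast?_cons] at hl
    have : (pvItems gaps).filter (pvP tolerance x) = [] := List.Perm.eq_nil (hfp.trans (by rw [hnil]))
    simp [this]
  | some g =>
    obtain ⟨hgmem, hgmax⟩ := pv_getLast_max _ g hLp hl
    cases hfl : (pvItems gaps).filter (pvP tolerance x) with
    | nil =>
      exfalso
      rw [hfl] at hfp
      have := hfp.symm.eq_nil
      rw [this] at hl; simp at hl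
    | cons a t =>
      simp only [List.foldl_cons]
      cases hres : t.foldl (fun best u =>
          match best with
          | none => some u
          | some b => if u.2.1 > b.2.1 then some u else some b) (some a) with
      | none => exact absurd hres (pv_maxfold_none t a)
      | some w =>
        obtain ⟨hwm, hwa, hwall⟩ := pv_maxfold_spec t a w hres
        have hwmem : w ∈ (pvDecor gaps).filter (pvP tolerance x) := by
          apply hfp.mem_iff.mp
          rw [hfl]
          rcases hwm with rfl | h'
          · exact List.mem_cons_self
          · exact List.mem_cons_of_mem _ h'
        have hwmax : ∀ u ∈ (pvDecor gaps).filter (pvP tolerance x), u.2.1 ≤ w.2.1 := by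
          intro u hu
          have : u ∈ a :: t := by rw [← hfl]; exact hfp.mem_iff.mpr hu
          rcases List.mem_cons.mp this with rfl | h'
          · exact hwa
          · exact hwall u h'
        have : w = g := pv_idx_inj _ hLp w hwmem g hgmem
          (le_antisymm (hgmax w hwmem) (hwmax g hgmem))
        rw [this]

-- the reversed-decoration find? is the last-wins fold of A over plain gaps
theorem pv_decor_find_start (gaps : List (Int × Int)) (tolerance x : Int) :
    (match (pvDecor gaps).reverse.find? (pvP tolerance x) with
     | some t => t.2.2.2
     | none => x)
      = gaps.foldl (fun acc g =>
          if |PySem.Int.floordiv (g.1 + g.2) 2 - x| < tolerance then g.2 else acc) x := by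
  rw [pv_foldl_last (fun g : Int × Int => |PySem.Int.floordiv (g.1 + g.2) 2 - x| < tolerance)
      (fun g : Int × Int => g.2) gaps x]
  unfold pvDecor
  rw [← List.map_reverse, List.find?_map]
  have : gaps.reverse = (gaps.zipIdx.reverse).map Prod.fst := by
    rw [List.map_reverse]; simp
  rw [this, List.find?_map]
  have hp : ((pvP tolerance x) ∘ (fun gi : (Int × Int) × Nat =>
        (PySem.Int.floordiv (gi.1.1 + gi.1.2) 2, (gi.2 : Int), gi.1.1, gi.1.2)))
      = ((fun g : Int × Int => decide (|PySem.Int.floordiv (g.1 + g.2) 2 - x| < tolerance)) ∘ Prod.fst) := by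
    funext gi; simp [pvP]
  rw [hp]
  cases gaps.zipIdx.reverse.find? ((fun g : Int × Int => decide (|PySem.Int.floordiv (g.1 + g.2) 2 - x| < tolerance)) ∘ Prod.fst) with
  | none => simp
  | some gi => simp

theorem pv_decor_find_end (gaps : List (Int × Int)) (tolerance x : Int) :
    (match (pvDecor gaps).reverse.find? (pvP tolerance x) with
     | some t => t.2.2.1
     | none => x)
      = gaps.foldl (fun acc g =>
          if |PySem.Int.floordiv (g.1 + g.2) 2 - x| < tolerance then g.1 else acc) x := by
  rw [pv_foldl_last (fun g : Int × Int => |PySem.Int.floordiv (g.1 + g.2) 2 - x| < tolerance)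
      (fun g : Int × Int => g.1) gaps x]
  unfold pvDecor
  rw [← List.map_reverse, List.find?_map]
  have : gaps.reverse = (gaps.zipIdx.reverse).map Prod.fst := by
    rw [List.map_reverse]; simp
  rw [this, List.find?_map]
  have hp : ((pvP tolerance x) ∘ (fun gi : (Int × Int) × Nat =>
        (PySem.Int.floordiv (gi.1.1 + gi.1.2) 2, (gi.2 : Int), gi.1.1, gi.1.2)))
      = ((fun g : Int × Int => decide (|PySem.Int.floordiv (g.1 + g.2) 2 - x| < tolerance)) ∘ Prod.fst) := by
    funext gi; simp [pvP]
  rw [hp]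
  cases gaps.zipIdx.reverse.find? ((fun g : Int × Int => decide (|PySem.Int.floordiv (g.1 + g.2) 2 - x| < tolerance)) ∘ Prod.fst) with
  | none => simp
  | some gi => simp

-- ===== VERDICT =====
theorem refine_boundaries_with_gaps_spec : Claim_equal_refine_boundaries_with_gaps := by
  intro ibs gaps tol hdom
  clear hdom
  unfold Spec_refine_boundaries_with_gaps refine_boundaries_with_gaps refine_boundaries_with_gaps_alt
  by_cases hg : gaps = []
  · subst hg
    simp only [reduceIte]
    rw [PySem.List.foldl_append_singleton_eq_map]
    simp only [pvQuery, pvItems, pvDecor, pvBisectLeft, PySem.List.slice,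
      List.nil_append]
    induction ibs with
    | nil => simp
    | cons a t ih => simpa using ih
  · simp only [hg, ite_false]
    rw [PySem.List.foldl_append_singleton_eq_map, PySem.List.foldl_append_singleton_eq_map]
    simp only [List.nil_append]
    apply List.map_congr_left
    intro se _
    rw [pv_pair_fold gaps tol se.1 se.2 (se.1, se.2)]
    rw [pv_query_eq, pv_query_eq, pv_decor_find_start, pv_decor_find_end]
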